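-- pv_equiv track=rewrite | github.com/JuanPyV/Python | ListaAnidada/matrices.py | creaMatriz4
-- ===== SOURCE A (Python) =====
-- def creaMatriz4(n):
--     listaA=[]
--     for i in range(n):
--         lista_int=[]
--         for num in range(n):
--             lista_int.append(i+1)
--             i+=n
--         listaA.append(lista_int)
--     return listaA
-- ===== SOURCE B (Python) =====
-- def creaMatriz4(n):
--     # Cell [i][j] of A's result is i+1+j*n: the transpose of the row-major
--     # table holding 1..n*n.  Build that table (as cheap lazy ranges), then
--     # return its transpose via zip.
--     rows = [range(k * n + 1, k * n + n + 1) for k in range(n)]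
--     return [list(col) for col in zip(*rows)]
-- ===== Notes on version B (the rewrite author's own statement) =====
-- stated objective: alternative
-- what changed: A fills each cell with a nested loop mutating an accumulator i += n; B instead builds the row-major table of 1..n*n in one contiguous fill and then returns its transpose via zip(*rows), a two-stage table-then-transpose algorithm.
import Mathlib
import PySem

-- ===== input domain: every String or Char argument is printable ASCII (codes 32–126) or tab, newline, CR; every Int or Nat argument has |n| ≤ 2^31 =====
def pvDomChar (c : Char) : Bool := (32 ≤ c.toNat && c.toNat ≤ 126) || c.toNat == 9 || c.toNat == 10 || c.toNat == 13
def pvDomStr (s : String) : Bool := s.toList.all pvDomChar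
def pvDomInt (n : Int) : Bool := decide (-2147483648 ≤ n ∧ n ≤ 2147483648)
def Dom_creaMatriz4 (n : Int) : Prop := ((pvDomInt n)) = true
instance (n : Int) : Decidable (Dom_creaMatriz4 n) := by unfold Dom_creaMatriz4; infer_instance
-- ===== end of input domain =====

-- B builds the row-major table of 1..n*n and returns its transpose (zip), instead of A's per-cell accumulator loop.

-- ===== PORT A =====
def creaMatriz4 (n : Int) : List (List Int) :=
  (PySem.List.pyRange 0 n 1).foldl
    (fun listaA i =>
      let p := (PySem.List.pyRange 0 n 1).foldl
        (fun (st : List Int × Int) _ => (st.1 ++ [st.2 + 1], st.2 + n)) (([] : List Int), i)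
      listaA ++ [p.1]) []

-- ===== PORT B =====
-- zip(*rows): repeatedly emit the heads of all rows while every row is nonempty
-- (Python's zip stops at the shortest iterable; zip() of no rows yields nothing).
def pvZipCols (rows : List (List Int)) : List (List Int) :=
  match rows with
  | [] => []
  | r :: rs =>
    if h : r ≠ [] ∧ rs.all (fun x => !x.isEmpty) then
      (r.head h.1 :: rs.map (fun x => x.headD 0)) :: pvZipCols (r.tail :: rs.map List.tail)
    else []
termination_by (match rows with | [] => 0 | r :: _ => r.length)
decreasing_by
  simp only [List.length_tail]
  have := List.length_pos_iff.mpr h.1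
  omega

def creaMatriz4_alt (n : Int) : List (List Int) :=
  let rows := (PySem.List.pyRange 0 n 1).map
    (fun k => PySem.List.pyRange (k * n + 1) (k * n + n + 1) 1)
  pvZipCols rows

-- ===== PRECONDITION & SPEC =====
def Spec_creaMatriz4 (n : Int) (out : List (List Int)) : Prop := out = creaMatriz4_alt n
instance (n : Int) (out : List (List Int)) : Decidable (Spec_creaMatriz4 n out) := by unfold Spec_creaMatriz4; infer_instance

-- ===== CLAIM (what is proved, stated in full; the proofs are below) =====
def Claim_equal_creaMatriz4 : Prop := ∀ (n : Int), Dom_creaMatriz4 n → Spec_creaMatriz4 n (creaMatriz4 n)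

-- ===== LEMMAS AND PROOFS =====

-- A's inner accumulator loop, in closed form
theorem innerA (n : Int) (l : List Int) :
    ∀ (acc : List Int) (v : Int),
    l.foldl (fun (st : List Int × Int) _ => (st.1 ++ [st.2 + 1], st.2 + n)) (acc, v)
      = (acc ++ (List.range l.length).map (fun (j : Nat) => v + 1 + (j : Int) * n),
         v + (l.length : Int) * n) := by
  induction l with
  | nil => intro acc v; simp
  | cons x xs ih =>
    intro acc v
    simp only [List.foldl_cons, List.length_cons]
    rw [ih]
    simp only [Prod.mk.injEq]
    refine ⟨?_, by push_cast; ring⟩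
    rw [List.range_succ_eq_map, List.map_cons, List.map_map,
        List.append_assoc, List.singleton_append]
    congr 1
    congr 1
    · push_cast; ring
    · apply List.map_congr_left
      intro j _
      simp only [Function.comp]
      push_cast
      ring

-- append-a-row loop = map
theorem outerA (f : Int → List Int) (ks : List Int) :
    ∀ (acc : List (List Int)),
    ks.foldl (fun a i => a ++ [f i]) acc = acc ++ ks.map f := by
  induction ks with
  | nil => simp
  | cons k ks ih => intro acc; simp [ih]

-- zip-transpose of a nonempty rectangular table given by a function:
-- column j of the result collects entry j of every row.
theorem zipCols_rect (c : Nat) : ∀ (ks : List Int), ks ≠ [] → ∀ (g : Int → Nat → Int),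
    pvZipCols (ks.map (fun k => (List.range c).map (g k)))
      = (List.range c).map (fun j => ks.map (fun k => g k j)) := by
  induction c with
  | zero =>
    intro ks hks g
    cases ks with
    | nil => simp at hks
    | cons k ks' =>
      rw [pvZipCols.eq_def]
      simp
  | succ c ih =>
    intro ks hks g
    cases ks with
    | nil => simp at hks
    | cons k ks' =>
      rw [List.range_succ_eq_map]
      simp only [List.map_cons, List.map_map]
      rw [pvZipCols.eq_def]
      simp only []
      rw [dif_pos (by simp [Function.comp])]
      have htails : ((g k 0 :: (List.range c).map ((g k) ∘ Nat.succ)).tail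
            :: (ks'.map (fun k => g k 0 :: (List.range c).map ((g k) ∘ Nat.succ))).map List.tail)
          = (k :: ks').map (fun k => (List.range c).map (fun j => g k (j + 1))) := by
        simp [List.map_map, Function.comp]
      rw [htails, ih (k :: ks') (by simp) (fun k j => g k (j + 1))]
      simp [List.map_map, Function.comp]

-- ===== VERDICT (by name: the statement is the Claim_ definition above) =====
theorem creaMatriz4_spec : Claim_equal_creaMatriz4 := by
  intro n _
  unfold Spec_creaMatriz4 creaMatriz4 creaMatriz4_alt
  by_cases hn : n ≤ 0
  · rw [PySem.List.pyRange_one_eq_nil hn]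
    rw [pvZipCols.eq_def]
    simp
  · rw [not_le] at hn
    have hlen : (PySem.List.pyRange 0 n 1).length = n.toNat := by
      rw [PySem.List.length_pyRange_one]; omega
    -- A: each outer step appends the closed-form row
    have hstep : (fun (listaA : List (List Int)) (i : Int) =>
        let p := (PySem.List.pyRange 0 n 1).foldl
          (fun (st : List Int × Int) _ => (st.1 ++ [st.2 + 1], st.2 + n)) (([] : List Int), i)
        listaA ++ [p.1])
        = fun listaA i =>
            listaA ++ [(List.range n.toNat).map (fun (j : Nat) => i + 1 + (j : Int) * n)] := by
      funext a i
      simp only []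
      rw [innerA n (PySem.List.pyRange 0 n 1) [] i, hlen]
      simp
    rw [hstep, outerA (fun i => (List.range n.toNat).map (fun (j : Nat) => i + 1 + (j : Int) * n))
        (PySem.List.pyRange 0 n 1) [], List.nil_append]
    -- B: each row is the step-1 range k*n+1 .. k*n+n, i.e. g k j = k*n+1+j
    have hrows : (PySem.List.pyRange 0 n 1).map
          (fun k => PySem.List.pyRange (k * n + 1) (k * n + n + 1) 1)
        = (PySem.List.pyRange 0 n 1).map
          (fun k => (List.range n.toNat).map (fun (j : Nat) => k * n + 1 + (j : Int))) := by
      apply List.map_congr_left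
      intro k _
      have h1 : k * n + n + 1 - (k * n + 1) = n := by ring
      rw [PySem.List.pyRange_one, h1]
    rw [hrows, zipCols_rect n.toNat (PySem.List.pyRange 0 n 1)
        (by rw [PySem.List.pyRange_one_cons hn]; simp) (fun k j => k * n + 1 + (j : Int))]
    -- both sides are (range n).map of rows; align the index lists
    rw [PySem.List.pyRange_one]
    simp only [Int.sub_zero, List.map_map]
    apply List.map_congr_left
    intro i _
    simp only [Function.comp_apply]
    apply List.map_congr_left
    intro j _
    simp only [Function.comp_apply]
    ring
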